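-- pv_equiv track=rewrite | github.com/JoshuaDunnink/advent | source/2015/day_5.py | has_three_check_vowels
-- ===== SOURCE A (Python) =====
-- def has_three_check_vowels(line=str):
--     vowels = list("aeiou")
--     count = 0
--     for char in vowels:
--         count += line.count(char)
--
--     if count >= 3:
--         return True
--     else:
--         return False
-- ===== SOURCE B (Python) =====
-- def has_three_check_vowels(line=str):
--     vowels = set("aeiou")
--     count = 0
--     for char in line:
--         if char in vowels:
--             count += 1
--             if count >= 3:
--                 return True
--     return False
-- ===== Notes on version B (the rewrite author's own statement) =====
-- stated objective: idiomatic
-- what changed: B makes a single pass over the string's characters with an early return once the third vowel is seen, instead of A's five separate line.count scans (one full pass per vowel) summed before one final comparison.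
import Mathlib
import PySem

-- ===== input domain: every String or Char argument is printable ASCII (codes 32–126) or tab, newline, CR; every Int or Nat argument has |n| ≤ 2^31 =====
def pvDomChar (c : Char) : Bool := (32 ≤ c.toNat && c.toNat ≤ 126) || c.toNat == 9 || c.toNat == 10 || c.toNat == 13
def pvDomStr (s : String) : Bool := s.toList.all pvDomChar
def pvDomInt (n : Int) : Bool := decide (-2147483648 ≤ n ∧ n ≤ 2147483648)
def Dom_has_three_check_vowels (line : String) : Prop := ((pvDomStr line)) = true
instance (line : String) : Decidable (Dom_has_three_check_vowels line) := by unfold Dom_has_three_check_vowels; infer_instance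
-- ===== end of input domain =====

-- B replaces A's five separate per-vowel count scans with a single pass over the
-- characters, returning early once the third vowel is found (idiomatic, same cost class).


-- ===== PORT A =====
-- vowels = list("aeiou"); count = 0; for char in vowels: count += line.count(char); return count >= 3
def has_three_check_vowels (line : String) : Bool :=
  let vowels : List Char := "aeiou".toList
  let count : Int := vowels.foldl (fun acc c => acc + (PySem.Str.count line (String.ofList [c]) : Int)) 0
  if count ≥ 3 then true else false

-- ===== PORT B =====
-- single pass over the characters with an early return at the third vowel
def hasThreeLoop (vowels : List Char) : List Char → Int → Bool
  | [], _ => false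
  | c :: rest, count =>
    if vowels.contains c then
      if count + 1 ≥ 3 then true
      else hasThreeLoop vowels rest (count + 1)
    else hasThreeLoop vowels rest count

def has_three_check_vowels_alt (line : String) : Bool :=
  hasThreeLoop "aeiou".toList line.toList 0

-- ===== PRECONDITION & SPEC =====
def Spec_has_three_check_vowels (line : String) (out : Bool) : Prop := out = has_three_check_vowels_alt line
instance (line : String) (out : Bool) : Decidable (Spec_has_three_check_vowels line out) := by unfold Spec_has_three_check_vowels; infer_instance

-- ===== CLAIM (what is proved, stated in full; the proofs are below) =====
def Claim_equal_has_three_check_vowels : Prop := ∀ (line : String), Dom_has_three_check_vowels line → Spec_has_three_check_vowels line (has_three_check_vowels line)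

-- ===== LEMMAS AND PROOFS =====

-- Python's str.count on a single-character needle is plain character counting.
theorem chars_count_singleton (c : Char) (l : List Char) :
    PySem.Chars.count l [c] = l.count c := by
  have go : ∀ (l : List Char) (fuel acc : Nat), l.length ≤ fuel →
      PySem.Chars.count.go [c] fuel l acc = acc + l.count c := by
    intro l
    induction l with
    | nil => intro fuel acc _; cases fuel <;> simp [PySem.Chars.count.go]
    | cons h t ih =>
      intro fuel acc hf
      cases fuel with
      | zero => simp at hf
      | succ n =>
        simp only [PySem.Chars.count.go, List.isPrefixOf, List.length_cons,
          List.length_nil, List.drop_succ_cons, List.drop_zero]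
        by_cases hc : c = h
        · subst hc
          simp only [BEq.rfl, Bool.true_and, if_pos]
          rw [ih n (acc + 1) (by simpa using Nat.le_of_succ_le_succ hf)]
          simp
          omega
        · have hb : (c == h) = false := by simp [hc]
          simp only [hb, Bool.false_and, if_neg Bool.false_ne_true]
          rw [ih n acc (by simpa using Nat.le_of_succ_le_succ hf)]
          simp [Ne.symm hc]
  simp only [PySem.Chars.count, List.isEmpty_cons, if_neg Bool.false_ne_true]
  rw [go l l.length 0 le_rfl]
  omega

def isVowel (c : Char) : Bool := "aeiou".toList.contains c

-- the five per-vowel if-increments of a character collapse to one vowel test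
theorem vowel_split (h : Char) :
    ((if h = 'a' then (1 : Int) else 0) + (if h = 'e' then 1 else 0) +
     (if h = 'i' then 1 else 0) + (if h = 'o' then 1 else 0) +
     (if h = 'u' then 1 else 0)) = (if isVowel h then 1 else 0) := by
  by_cases ha : h = 'a' <;> by_cases he : h = 'e' <;> by_cases hi : h = 'i' <;>
    by_cases ho : h = 'o' <;> by_cases hu : h = 'u' <;> simp_all [isVowel]

-- A's summed per-vowel character counts equal the number of vowel characters.
theorem a_count_eq (l : List Char) :
    ((l.count 'a' : Int) + l.count 'e' + l.count 'i' + l.count 'o' + l.count 'u')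
      = (l.countP isVowel : Int) := by
  induction l with
  | nil => simp
  | cons h t ih =>
    have hv := vowel_split h
    simp only [List.count_cons, List.countP_cons]
    push_cast
    by_cases hV : isVowel h <;> simp only [hV, if_pos] at hv ⊢ <;>
      simp only [beq_iff_eq] <;> split_ifs at hv ⊢ <;> omega

-- B's early-exit loop decides "count so far + remaining vowels ≥ 3".
theorem hasThreeLoop_eq (l : List Char) (count : Int) (h : count < 3) :
    hasThreeLoop "aeiou".toList l count = decide (3 ≤ count + (l.countP isVowel : Int)) := by
  induction l generalizing count with
  | nil => simp [hasThreeLoop]; omega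
  | cons c rest ih =>
    simp only [hasThreeLoop]
    by_cases hv : isVowel c
    · rw [if_pos (by simpa [isVowel] using hv)]
      by_cases h3 : count + 1 ≥ 3
      · rw [if_pos h3]
        have hc : (0 : Int) ≤ (rest.countP isVowel : Int) := Int.natCast_nonneg _
        simp only [List.countP_cons, hv, if_pos]
        push_cast
        rw [eq_comm, decide_eq_true_eq]
        omega
      · rw [if_neg h3, ih (count + 1) (by omega)]
        simp only [List.countP_cons, hv, if_pos, decide_eq_decide]
        push_cast
        omega
    · rw [if_neg (by simpa [isVowel] using hv), ih count h]
      simp [hv]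

-- ===== VERDICT (by name: the statement is the Claim_ definition above) =====
theorem has_three_check_vowels_spec : Claim_equal_has_three_check_vowels := by
  intro line _
  unfold Spec_has_three_check_vowels has_three_check_vowels has_three_check_vowels_alt
  simp only [PySem.Str.count_eq]
  rw [hasThreeLoop_eq _ 0 (by norm_num)]
  have hv : "aeiou".toList = ['a', 'e', 'i', 'o', 'u'] := rfl
  rw [hv]
  simp only [List.foldl]
  simp only [String.toList_ofList, chars_count_singleton]
  have := a_count_eq line.toList
  rw [zero_add]
  by_cases h : (3 : Int) ≤ (line.toList.countP isVowel : Int)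
  · rw [if_pos (by omega), eq_comm, decide_eq_true_eq]; omega
  · rw [if_neg (by omega), eq_comm, decide_eq_false_iff_not]; omega
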